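-- pv_equiv track=rewrite | github.com/elmoallistair/3ka17-telebot | response.py | msg_to_command
-- ===== SOURCE A (Python) =====
-- def msg_to_command(msg): # need  improvement
--     keywords = {
--         "/start"        : ["mulai", "aktifkan", "bot", "start"],
--         "/help"         : ["bantuan", "help", "penggunaan", "cara pakai"],
--         "/perintah"     : ["perintah", "command", "instruksi"],
--         "/jadwal_kuliah": ["kuliah", "jadwal", "mata kuliah", "pelajaran"],
--         "/jadwal_ujian" : ["ujian", "uts", "uu", "uas"],
--         "/kalender"     : ["acara", "kalender", "kalendar", "event", "kegiatan"],
--         "/tugas"        : ["tugas", "pr", "v-class"],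
--         "/berita"       : ["berita", "news"],
--         "/seminar"      : ["seminar", "event"],
--         "/website"      : ["direktori", "web", "website"]
--     }
--     if msg in keywords.keys():
--         return msg
--
--     list_msg = msg.lower().split()
--
--     all_keys = []
--     for value in keywords.values():
--         all_keys.extend(value)
--
--     for msg_key in list_msg:
--         for key,value in keywords.items():
--             if msg_key in value:
--                 return key
--
--     return None
-- ===== SOURCE B (Python) =====
-- def msg_to_command(msg):
--     keywords = {
--         "/start"        : ["mulai", "aktifkan", "bot", "start"],
--         "/help"         : ["bantuan", "help", "penggunaan", "cara pakai"],
--         "/perintah"     : ["perintah", "command", "instruksi"],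
--         "/jadwal_kuliah": ["kuliah", "jadwal", "mata kuliah", "pelajaran"],
--         "/jadwal_ujian" : ["ujian", "uts", "uu", "uas"],
--         "/kalender"     : ["acara", "kalender", "kalendar", "event", "kegiatan"],
--         "/tugas"        : ["tugas", "pr", "v-class"],
--         "/berita"       : ["berita", "news"],
--         "/seminar"      : ["seminar", "event"],
--         "/website"      : ["direktori", "web", "website"]
--     }
--     if msg in keywords:
--         return msg
--
--     reverse = {}
--     for command, words in keywords.items():
--         for word in words:
--             reverse.setdefault(word, command)
--
--     for word in msg.lower().split():
--         command = reverse.get(word)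
--         if command is not None:
--             return command
--     return None
-- ===== Notes on version B (the rewrite author's own statement) =====
-- stated objective: idiomatic
-- what changed: B builds a reverse keyword->command dict once with setdefault (first command wins for the duplicated 'event') and answers each word by a single dict lookup, replacing A's inner scan over all keyword lists per word and dropping the unused all_keys accumulation.
import Mathlib
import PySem

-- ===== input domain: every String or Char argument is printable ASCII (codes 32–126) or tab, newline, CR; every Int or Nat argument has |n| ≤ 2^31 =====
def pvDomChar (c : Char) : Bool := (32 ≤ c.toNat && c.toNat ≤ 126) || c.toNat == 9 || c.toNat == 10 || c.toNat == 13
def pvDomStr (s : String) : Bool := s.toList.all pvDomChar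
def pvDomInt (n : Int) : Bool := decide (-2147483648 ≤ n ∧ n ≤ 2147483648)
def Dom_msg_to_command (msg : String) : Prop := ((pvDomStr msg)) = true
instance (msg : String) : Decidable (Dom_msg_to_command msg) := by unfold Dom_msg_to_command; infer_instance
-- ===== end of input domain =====

-- B replaces A's per-word inner scan over every keyword list by one reverse keyword->command
-- dict built once with setdefault (first command wins for the duplicated keyword); objective: idiomatic.

-- The keyword table both Pythons begin with (a dict literal with distinct keys).
def pvKeywordsDict : PySem.Dict String (List String) := PySem.Dict.ofList [
  ("/start"        , ["mulai", "aktifkan", "bot", "start"]),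
  ("/help"         , ["bantuan", "help", "penggunaan", "cara pakai"]),
  ("/perintah"     , ["perintah", "command", "instruksi"]),
  ("/jadwal_kuliah", ["kuliah", "jadwal", "mata kuliah", "pelajaran"]),
  ("/jadwal_ujian" , ["ujian", "uts", "uu", "uas"]),
  ("/kalender"     , ["acara", "kalender", "kalendar", "event", "kegiatan"]),
  ("/tugas"        , ["tugas", "pr", "v-class"]),
  ("/berita"       , ["berita", "news"]),
  ("/seminar"      , ["seminar", "event"]),
  ("/website"      , ["direktori", "web", "website"])]

-- ===== PORT A =====
-- inner 'for key,value in keywords.items(): if msg_key in value: return key'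
def pvInnerA : List (String × List String) → String → Option String
  | [], _ => none
  | (k, v) :: rest, w => if v.contains w then some k else pvInnerA rest w

-- outer 'for msg_key in list_msg: …'
def pvLoopA (kws : List (String × List String)) : List String → Option String
  | [] => none
  | w :: ws =>
    match pvInnerA kws w with
    | some k => some k
    | none => pvLoopA kws ws

def msg_to_command (msg : String) : Option String :=
  if pvKeywordsDict.keys.contains msg then some msg
  else
    let list_msg := PySem.Str.split₀ (PySem.Str.lower msg)
    -- A builds all_keys but never uses it
    let _all_keys := pvKeywordsDict.values.foldl (fun acc v => acc ++ v) ([] : List String)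
    pvLoopA pvKeywordsDict.items list_msg

-- ===== PORT B =====
-- 'for command, words in keywords.items(): for word in words: reverse.setdefault(word, command)'
def pvReverse : PySem.Dict String String :=
  pvKeywordsDict.items.foldl
    (fun d kv => kv.2.foldl (fun d word => d.setdefault word kv.1) d)
    PySem.Dict.empty

-- 'for word in …: command = reverse.get(word); if command is not None: return command'
def pvLoopB (rev : PySem.Dict String String) : List String → Option String
  | [] => none
  | w :: ws =>
    match rev.get? w with
    | some c => some c
    | none => pvLoopB rev ws

def msg_to_command_alt (msg : String) : Option String :=
  if pvKeywordsDict.contains msg then some msg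
  else pvLoopB pvReverse (PySem.Str.split₀ (PySem.Str.lower msg))

-- ===== PRECONDITION & SPEC =====
def Spec_msg_to_command (msg : String) (out : Option String) : Prop := out = msg_to_command_alt msg
instance (msg : String) (out : Option String) : Decidable (Spec_msg_to_command msg out) := by unfold Spec_msg_to_command; infer_instance

-- ===== CLAIM (what is proved, stated in full; the proofs are below) =====
def Claim_equal_msg_to_command : Prop := ∀ (msg : String), Dom_msg_to_command msg → Spec_msg_to_command msg (msg_to_command msg)

-- ===== LEMMAS AND PROOFS =====

-- first-match scan over an association list of (keyword, command) pairs
def pvScan : List (String × String) → String → Option String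
  | [], _ => none
  | (k, c) :: rest, w => if k == w then some c else pvScan rest w

-- A's nested table, flattened to (keyword, command) pairs in scan order
def pvFlatten (l : List (String × List String)) : List (String × String) :=
  l.flatMap (fun kv => kv.2.map (fun x => (x, kv.1)))

theorem pvScan_append (a b : List (String × String)) (w : String) :
    pvScan (a ++ b) w = (pvScan a w).or (pvScan b w) := by
  induction a with
  | nil => simp [pvScan]
  | cons p rest ih =>
    obtain ⟨k, c⟩ := p
    by_cases h : k == w <;> simp [pvScan, h, ih]

theorem pvScan_map_pair (v : List String) (k w : String) :
    pvScan (v.map (fun x => (x, k))) w = if v.contains w then some k else none := by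
  induction v with
  | nil => simp [pvScan]
  | cons x rest ih =>
    simp only [List.map_cons, pvScan, ih, List.contains_cons, Bool.beq_comm (a := w)]
    by_cases h : x == w <;> simp [h]

theorem pvInnerA_eq_scan (l : List (String × List String)) (w : String) :
    pvInnerA l w = pvScan (pvFlatten l) w := by
  induction l with
  | nil => simp [pvInnerA, pvFlatten, pvScan]
  | cons p rest ih =>
    obtain ⟨k, v⟩ := p
    simp only [pvFlatten, List.flatMap_cons] at *
    rw [pvScan_append, pvScan_map_pair]
    by_cases h : w ∈ v <;> simp [pvInnerA, h, ih]

theorem pvSetdefault_fold_get? (v : List String) (k : String)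
    (d : PySem.Dict String String) (w : String) :
    (v.foldl (fun d x => d.setdefault x k) d).get? w
      = (d.get? w).or (pvScan (v.map (fun x => (x, k))) w) := by
  induction v generalizing d with
  | nil => simp [pvScan]
  | cons x rest ih =>
    simp only [List.foldl_cons, List.map_cons, pvScan, ih]
    by_cases h : x == w
    · have hw : w = x := (beq_iff_eq.mp h).symm
      subst hw
      rw [PySem.Dict.get?_setdefault_self]
      cases hd : d.get? w <;> simp
    · have hw : w ≠ x := fun hc => h (beq_iff_eq.mpr hc.symm)
      rw [PySem.Dict.get?_setdefault_of_ne _ _ hw]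
      simp [h]

theorem pvReverse_fold_get? (l : List (String × List String))
    (d : PySem.Dict String String) (w : String) :
    (l.foldl (fun d kv => kv.2.foldl (fun d word => d.setdefault word kv.1) d) d).get? w
      = (d.get? w).or (pvScan (pvFlatten l) w) := by
  induction l generalizing d with
  | nil => simp [pvFlatten, pvScan]
  | cons p rest ih =>
    obtain ⟨k, v⟩ := p
    simp only [List.foldl_cons, ih, pvSetdefault_fold_get?, pvFlatten, List.flatMap_cons,
      pvScan_append, Option.or_assoc]

set_option maxRecDepth 4096 in
theorem pvReverse_get? (w : String) :
    pvReverse.get? w = pvScan (pvFlatten pvKeywordsDict.items) w := by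
  unfold pvReverse
  rw [pvReverse_fold_get?]
  rw [PySem.Dict.get?_empty]
  rfl

theorem pvLoop_congr (kws : List (String × List String)) (rev : PySem.Dict String String)
    (h : ∀ w, pvInnerA kws w = rev.get? w) (ws : List String) :
    pvLoopA kws ws = pvLoopB rev ws := by
  induction ws with
  | nil => rfl
  | cons w rest ih => rw [pvLoopA, pvLoopB, h w, ih]

theorem pvLoopA_eq_pvLoopB (ws : List String) :
    pvLoopA pvKeywordsDict.items ws = pvLoopB pvReverse ws :=
  pvLoop_congr _ _ (fun w => (pvInnerA_eq_scan _ w).trans (pvReverse_get? w).symm) ws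

theorem pvGuard_eq (msg : String) :
    pvKeywordsDict.keys.contains msg = pvKeywordsDict.contains msg := by
  rw [PySem.Dict.contains_eq_decide_mem_keys]
  simp

-- ===== VERDICT (by name: the statement is the Claim_ definition above) =====
set_option maxRecDepth 8192 in
theorem msg_to_command_spec : Claim_equal_msg_to_command := by
  intro msg _
  unfold Spec_msg_to_command msg_to_command msg_to_command_alt
  rw [pvGuard_eq]
  by_cases h : pvKeywordsDict.contains msg
  · simp [h]
  · simp [h, pvLoopA_eq_pvLoopB]
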